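-- pv_equiv track=rewrite | github.com/JongKyuHong/TIL | Algorithm/2021.12.3w/algo/약수의개수와덧셈.py | solution
-- ===== SOURCE A (Python) =====
-- def solution(left, right):
--     ans = 0
--     for i in range(left,right+1):
--         answer = 0
--         for j in range(1,i+1):
--             if i % j == 0:
--                 answer += 1
--         if answer % 2:
--             ans -= i
--         else:
--             ans += i
--     return ans
-- ===== SOURCE B (Python) =====
-- def solution(left, right):
--     if right < left:
--         return 0
--     total = (left + right) * (right - left + 1) // 2
--     k = 1
--     while k * k <= right:
--         if left <= k * k:
--             total -= 2 * k * k
--         k += 1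
--     return total
-- ===== Notes on version B (the rewrite author's own statement) =====
-- stated objective: alternative
-- what changed: A scans every i in [left,right] and counts its divisors with an inner loop; B computes the arithmetic-series total in closed form and corrects it by subtracting 2*k*k for each perfect square k*k in the range, found by a single loop over k while k*k <= right.
import Mathlib
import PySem

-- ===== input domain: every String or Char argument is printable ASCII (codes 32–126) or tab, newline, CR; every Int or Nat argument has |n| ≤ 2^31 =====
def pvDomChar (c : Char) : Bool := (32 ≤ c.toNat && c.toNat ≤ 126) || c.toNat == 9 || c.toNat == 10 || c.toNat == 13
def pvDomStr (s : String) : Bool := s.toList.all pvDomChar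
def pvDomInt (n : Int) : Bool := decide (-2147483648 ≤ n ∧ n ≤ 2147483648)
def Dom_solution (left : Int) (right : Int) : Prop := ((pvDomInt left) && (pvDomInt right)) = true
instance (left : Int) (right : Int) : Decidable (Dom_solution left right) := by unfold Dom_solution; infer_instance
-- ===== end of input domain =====

-- B replaces A's divisor-counting double loop by a different algorithm: the closed-form
-- arithmetic series minus 2·(each perfect square in [left,right]) found by a loop over square roots.

-- ===== PORT A =====
def solution (left : Int) (right : Int) : Int :=
  (PySem.List.pyRange left (right + 1) 1).foldl
    (fun ans i =>
      let answer : Int :=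
        (PySem.List.pyRange 1 (i + 1) 1).foldl
          (fun answer j => if PySem.Int.mod i j == 0 then answer + 1 else answer) 0
      if PySem.Int.mod answer 2 ≠ 0 then ans - i else ans + i) 0

-- ===== PORT B =====
-- the 'while k*k <= right' loop of Source B; total is the running value
def solutionAltLoop (left : Int) (right : Int) (k : Int) (total : Int) : Int :=
  if h : k * k ≤ right then
    solutionAltLoop left right (k + 1) (if left ≤ k * k then total - 2 * (k * k) else total)
  else total
termination_by (right + 1 - k).toNat
decreasing_by
  have hk : k ≤ k * k := by nlinarith [sq_nonneg k, sq_nonneg (k - 1)]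
  omega

def solution_alt (left : Int) (right : Int) : Int :=
  if right < left then 0
  else
    solutionAltLoop left right 1
      (PySem.Int.floordiv ((left + right) * (right - left + 1)) 2)

-- ===== PRECONDITION & SPEC =====
def Spec_solution (left : Int) (right : Int) (out : Int) : Prop := out = solution_alt left right
instance (left : Int) (right : Int) (out : Int) : Decidable (Spec_solution left right out) := by unfold Spec_solution; infer_instance

-- ===== CLAIM (what is proved, stated in full; the proofs are below) =====
def Claim_equal_solution : Prop := ∀ (left : Int) (right : Int), Dom_solution left right → Spec_solution left right (solution left right)

-- ===== LEMMAS AND PROOFS =====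

-- the value A's loop adds for one i: minus i when i is a (positive) perfect square, else i
def pvG (i : Int) : Int :=
  if 1 ≤ i ∧ Nat.sqrt i.toNat * Nat.sqrt i.toNat = i.toNat then -i else i

-- the divisor-counting inner loop of A
def pvInner (i : Int) : Int :=
  (PySem.List.pyRange 1 (i + 1) 1).foldl
    (fun answer j => if PySem.Int.mod i j == 0 then answer + 1 else answer) 0

-- ---------- core number theory: parity of the divisor count ----------

theorem pv_countP_range_card (q : ℕ → Bool) (n : ℕ) :
    (List.range n).countP q = ((Finset.range n).filter (fun k => q k = true)).card := by
  induction n with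
  | zero => simp
  | succ m ih =>
    rw [List.range_succ, List.countP_append, ih, Finset.range_add_one, Finset.filter_insert]
    by_cases h : q m = true
    · rw [if_pos h, Finset.card_insert_of_notMem (by simp)]
      simp [h]
    · rw [if_neg h]
      simp [h]

-- divisor set of n as a filter of [1, n]
theorem pv_card_divisors_parity (n : ℕ) (hn : 1 ≤ n) :
    ((Finset.Icc 1 n).filter (fun d => d ∣ n)).card % 2 = 1 ↔ Nat.sqrt n * Nat.sqrt n = n := by
  have hn0 : 0 < n := hn
  set D := (Finset.Icc 1 n).filter (fun d => d ∣ n) with hD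
  set sml := D.filter (fun d => d * d < n) with hsml
  set big := D.filter (fun d => n < d * d) with hbig
  set mid := D.filter (fun d => d * d = n) with hmid
  -- partition of the divisor set by comparing d*d with n
  have hsplit : D.card = sml.card + mid.card + big.card := by
    have h1 : sml.card + (D.filter (fun d => ¬ d * d < n)).card = D.card :=
      Finset.card_filter_add_card_filter_not (fun d => d * d < n)
    have h2 : ((D.filter (fun d => ¬ d * d < n)).filter (fun d => d * d = n)).card +
        ((D.filter (fun d => ¬ d * d < n)).filter (fun d => ¬ d * d = n)).card =
        (D.filter (fun d => ¬ d * d < n)).card :=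
      Finset.card_filter_add_card_filter_not (fun d => d * d = n)
    have e1 : (D.filter (fun d => ¬ d * d < n)).filter (fun d => d * d = n) = mid := by
      rw [Finset.filter_filter, hmid]
      apply Finset.filter_congr
      intro d _
      constructor
      · intro h; exact h.2
      · intro h; exact ⟨by omega, h⟩
    have e2 : (D.filter (fun d => ¬ d * d < n)).filter (fun d => ¬ d * d = n) = big := by
      rw [Finset.filter_filter, hbig]
      apply Finset.filter_congr
      intro d _
      constructor
      · intro h; omega
      · intro h; omega
    rw [e1, e2] at h2
    omega
  -- the map d ↦ n / d pairs small divisors with big ones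
  have hpair : sml.card = big.card := by
    apply Finset.card_bij' (i := fun d _ => n / d) (j := fun e _ => n / e)
    · intro d hd
      rw [hsml, Finset.mem_filter, hD, Finset.mem_filter, Finset.mem_Icc] at hd
      obtain ⟨⟨⟨hd1, hdn⟩, hdvd⟩, hlt⟩ := hd
      obtain ⟨c, hc⟩ := hdvd
      have hd0 : 0 < d := hd1
      have hc0 : 0 < c := by nlinarith
      have hdc : n / d = c := by rw [hc, Nat.mul_div_cancel_left _ hd0]
      rw [hbig, Finset.mem_filter, hD, Finset.mem_filter, Finset.mem_Icc, hdc]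
      have hdltc : d < c := by nlinarith
      refine ⟨⟨⟨by omega, by nlinarith⟩, ⟨d, by rw [hc, Nat.mul_comm]⟩⟩, by nlinarith⟩
    · intro e he
      rw [hbig, Finset.mem_filter, hD, Finset.mem_filter, Finset.mem_Icc] at he
      obtain ⟨⟨⟨he1, hen⟩, hdvd⟩, hlt⟩ := he
      obtain ⟨c, hc⟩ := hdvd
      have he0 : 0 < e := he1
      have hc0 : 0 < c := by nlinarith
      have hec : n / e = c := by rw [hc, Nat.mul_div_cancel_left _ he0]
      rw [hsml, Finset.mem_filter, hD, Finset.mem_filter, Finset.mem_Icc, hec]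
      have hclt : c < e := by nlinarith
      refine ⟨⟨⟨by omega, by nlinarith⟩, ⟨e, by rw [hc, Nat.mul_comm]⟩⟩, by nlinarith⟩
    · intro d hd
      rw [hsml, Finset.mem_filter, hD, Finset.mem_filter, Finset.mem_Icc] at hd
      obtain ⟨⟨⟨hd1, hdn⟩, hdvd⟩, hlt⟩ := hd
      obtain ⟨c, hc⟩ := hdvd
      have hd0 : 0 < d := hd1
      have hc0 : 0 < c := by nlinarith
      have hdc : n / d = c := by rw [hc, Nat.mul_div_cancel_left _ hd0]
      rw [hdc, hc, Nat.mul_div_cancel _ hc0]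
    · intro e he
      rw [hbig, Finset.mem_filter, hD, Finset.mem_filter, Finset.mem_Icc] at he
      obtain ⟨⟨⟨he1, hen⟩, hdvd⟩, hlt⟩ := he
      obtain ⟨c, hc⟩ := hdvd
      have he0 : 0 < e := he1
      have hc0 : 0 < c := by nlinarith
      have hec : n / e = c := by rw [hc, Nat.mul_div_cancel_left _ he0]
      rw [hec, hc, Nat.mul_div_cancel _ hc0]
  -- the exact-square part has one element iff n is a square
  by_cases hsq : Nat.sqrt n * Nat.sqrt n = n
  · have hmid1 : mid = {Nat.sqrt n} := by
      ext d
      rw [hmid, Finset.mem_filter, hD, Finset.mem_filter, Finset.mem_Icc, Finset.mem_singleton]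
      constructor
      · intro ⟨_, hdd⟩
        have := Nat.sqrt_eq d
        rw [hdd] at this
        omega
      · intro h
        subst h
        have hs0 : 0 < Nat.sqrt n := by nlinarith
        refine ⟨⟨⟨by omega, by nlinarith⟩, ⟨Nat.sqrt n, hsq.symm⟩⟩, hsq⟩
    rw [hmid1] at hsplit
    simp only [Finset.card_singleton] at hsplit
    constructor
    · intro _; exact hsq
    · intro _; omega
  · have hmid0 : mid = ∅ := by
      ext d
      rw [hmid, Finset.mem_filter, hD, Finset.mem_filter, Finset.mem_Icc]
      simp only [Finset.notMem_empty, iff_false]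
      intro ⟨_, hdd⟩
      apply hsq
      rw [← hdd, Nat.sqrt_eq]
    rw [hmid0] at hsplit
    simp only [Finset.card_empty] at hsplit
    constructor
    · intro h; omega
    · intro h; exact absurd h hsq

theorem pv_inner_count (i : Int) (hi : 1 ≤ i) :
    pvInner i = (((List.range i.toNat).countP (fun k => i.toNat % (k + 1) == 0) : ℕ) : Int) := by
  obtain ⟨m, rfl⟩ : ∃ m : ℕ, i = (m : ℤ) := ⟨i.toNat, by omega⟩
  unfold pvInner
  rw [PySem.List.foldl_if_add_one, PySem.List.pyRange_one, List.countP_map, zero_add]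
  simp only [Int.toNat_natCast, add_sub_cancel_right]
  congr 1
  apply List.countP_congr
  intro k hk
  simp only [Function.comp]
  have h1 : (1 + (k : ℤ)) = (((k + 1 : ℕ) : ℤ)) := by push_cast; ring
  rw [h1, PySem.Int.mod_natCast]
  simp
  rw [show ((k:ℤ) + 1) = (((k + 1 : ℕ)) : ℤ) by push_cast; ring, Int.natCast_dvd_natCast]
  simp [Nat.dvd_iff_mod_eq_zero]

theorem pv_count_card (n : ℕ) :
    (List.range n).countP (fun k => n % (k + 1) == 0) = ((Finset.Icc 1 n).filter (fun d => d ∣ n)).card := by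
  rw [pv_countP_range_card]
  refine Finset.card_bij' (fun k _ => k + 1) (fun d _ => d - 1) ?_ ?_ ?_ ?_
  · intro k hk
    simp only [Finset.mem_filter, Finset.mem_range, beq_iff_eq] at hk
    simp only [Finset.mem_filter, Finset.mem_Icc]
    exact ⟨⟨by omega, by omega⟩, Nat.dvd_of_mod_eq_zero hk.2⟩
  · intro d hd
    simp only [Finset.mem_filter, Finset.mem_Icc] at hd
    simp only [Finset.mem_filter, Finset.mem_range, beq_iff_eq]
    obtain ⟨⟨hd1, hdn⟩, hdvd⟩ := hd
    refine ⟨by omega, ?_⟩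
    rw [show d - 1 + 1 = d by omega]
    exact Nat.dvd_iff_mod_eq_zero.mp hdvd
  · intro k hk
    show k + 1 - 1 = k
    omega
  · intro d hd
    simp only [Finset.mem_filter, Finset.mem_Icc] at hd
    show d - 1 + 1 = d
    omega

theorem pv_step_eq (ans i : Int) :
    (if PySem.Int.mod (pvInner i) 2 ≠ 0 then ans - i else ans + i) = ans + pvG i := by
  rcases le_or_gt 1 i with hi | hi
  · rw [pv_inner_count i hi, pv_count_card]
    set c := ((Finset.Icc 1 i.toNat).filter (fun d => d ∣ i.toNat)).card with hc
    have hmod : PySem.Int.mod ((c : ℕ) : Int) 2 = (((c % 2 : ℕ) : ℕ) : Int) := by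
      exact_mod_cast PySem.Int.mod_natCast c 2
    rw [hmod]
    have hpar := pv_card_divisors_parity i.toNat (by omega)
    rw [← hc] at hpar
    unfold pvG
    by_cases hsq : Nat.sqrt i.toNat * Nat.sqrt i.toNat = i.toNat
    · have h1 : c % 2 = 1 := hpar.mpr hsq
      rw [if_pos (by rw [h1]; norm_num), if_pos ⟨hi, hsq⟩]
      ring
    · have h1 : c % 2 ≠ 1 := fun h => hsq (hpar.mp h)
      have h0 : c % 2 = 0 := by omega
      rw [if_neg (by rw [h0]; norm_num), if_neg (by intro ⟨_, h⟩; exact hsq h)]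
  · have hnil : PySem.List.pyRange 1 (i + 1) 1 = [] :=
      PySem.List.pyRange_one_eq_nil (by omega)
    have hz : pvInner i = 0 := by unfold pvInner; rw [hnil]; rfl
    rw [hz]
    have : PySem.Int.mod 0 2 = 0 := by decide
    rw [this]
    unfold pvG
    rw [if_neg (by norm_num), if_neg (by intro ⟨h, _⟩; omega)]

-- ---------- sums ----------

theorem pv_sum_range_map (f : ℕ → Int) (n : ℕ) :
    ((List.range n).map f).sum = ∑ k ∈ Finset.range n, f k := by
  induction n with
  | zero => simp
  | succ m ih => simp [List.range_succ, Finset.sum_range_succ, ih]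

theorem pv_pyRange_sum (f : Int → Int) (a b : Int) :
    ((PySem.List.pyRange a b 1).map f).sum = ∑ i ∈ Finset.Ico a b, f i := by
  rw [PySem.List.pyRange_one, List.map_map, pv_sum_range_map]
  refine Finset.sum_nbij' (fun k => a + (k : Int)) (fun i => (i - a).toNat) ?_ ?_ ?_ ?_ ?_
  · intro k hk; simp at hk ⊢; try omega
  · intro i hi; simp at hi ⊢; try omega
  · intro k hk; simp at hk ⊢; try omega
  · intro i hi; simp at hi ⊢; try omega
  · intro k hk; simp

theorem pv_solution_sum (left right : Int) :
    solution left right = ∑ i ∈ Finset.Ico left (right + 1), pvG i := by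
  unfold solution
  change List.foldl (fun ans i => if PySem.Int.mod (pvInner i) 2 ≠ 0 then ans - i else ans + i) 0
    (PySem.List.pyRange left (right + 1) 1) = _
  rw [List.foldl_ext _ (fun (ans i : ℤ) => ans + pvG i) 0
    (fun a b _ => pv_step_eq a b)]
  rw [PySem.List.foldl_add, zero_add, pv_pyRange_sum]

theorem pv_sqrt_iff (r k : Int) (hk : 1 ≤ k) : k * k ≤ r ↔ k ≤ Int.sqrt r := by
  rcases le_or_gt 0 r with hr | hr
  · have hk' : ((k.toNat : ℕ) : Int) = k := by omega
    have hr' : ((r.toNat : ℕ) : Int) = r := by omega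
    have hcast : ((k.toNat * k.toNat : ℕ) : Int) = k * k := by push_cast; rw [hk']
    unfold Int.sqrt
    constructor
    · intro h
      have h1 : k.toNat * k.toNat ≤ r.toNat := by
        rw [← Nat.cast_le (α := ℤ), hcast, hr']; exact h
      have h2 := Nat.le_sqrt.mpr h1
      omega
    · intro h
      have h2 : k.toNat ≤ Nat.sqrt r.toNat := by omega
      have h1 := Nat.le_sqrt.mp h2
      rw [← hcast, ← hr']
      exact_mod_cast h1
  · have h2 : Int.sqrt r = 0 := by
      unfold Int.sqrt
      have : r.toNat = 0 := by omega
      simp [this]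
    constructor
    · intro h; nlinarith
    · intro h; omega

theorem pv_loop_eq (l r : Int) : ∀ (n : ℕ) (k total : Int), 1 ≤ k → n = (Int.sqrt r + 1 - k).toNat →
    solutionAltLoop l r k total =
      total - 2 * ∑ j ∈ Finset.Ico k (Int.sqrt r + 1), (if l ≤ j * j then j * j else 0) := by
  intro n
  induction n with
  | zero =>
    intro k total hk hn
    have hks : ¬ k * k ≤ r := by
      intro h
      have := (pv_sqrt_iff r k hk).mp h
      omega
    rw [solutionAltLoop, dif_neg hks]
    rw [Finset.Ico_eq_empty (by simp; omega), Finset.sum_empty]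
    ring
  | succ m ih =>
    intro k total hk hn
    by_cases h : k * k ≤ r
    · have hks : k ≤ Int.sqrt r := (pv_sqrt_iff r k hk).mp h
      rw [solutionAltLoop, dif_pos h]
      rw [ih (k + 1) _ (by omega) (by omega)]
      have hins : Finset.Ico k (Int.sqrt r + 1) = insert k (Finset.Ico (k + 1) (Int.sqrt r + 1)) := by
        ext x
        simp only [Finset.mem_Ico, Finset.mem_insert]
        omega
      rw [hins, Finset.sum_insert (by simp)]
      by_cases hl : l ≤ k * k
      · rw [if_pos hl, if_pos hl]; ring
      · rw [if_neg hl, if_neg hl]; ring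
    · have hks : Int.sqrt r < k := by
        by_contra hcon
        exact h ((pv_sqrt_iff r k hk).mpr (by omega))
      rw [solutionAltLoop, dif_neg h]
      rw [Finset.Ico_eq_empty (by simp; omega), Finset.sum_empty]
      ring

theorem pv_closed_form (a b : Int) (h : a ≤ b) :
    PySem.Int.floordiv ((a + b) * (b - a + 1)) 2 = ∑ i ∈ Finset.Ico a (b + 1), i := by
  have key : ∀ (n : ℕ) (b : Int), a ≤ b → n = (b - a).toNat →
      2 * (∑ i ∈ Finset.Ico a (b + 1), i) = (a + b) * (b - a + 1) := by
    intro n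
    induction n with
    | zero =>
      intro b hab hn
      have hba : b = a := by omega
      subst hba
      rw [show Finset.Ico b (b + 1) = {b} by ext x; simp; omega]
      simp
      ring
    | succ m ih =>
      intro b hab hn
      have hins : Finset.Ico a (b + 1) = insert b (Finset.Ico a b) := by
        ext x; simp only [Finset.mem_Ico, Finset.mem_insert]; omega
      rw [hins, Finset.sum_insert (by simp)]
      have hm := ih (b - 1) (by omega) (by omega)
      rw [show (b - 1 + 1 : ℤ) = b by ring] at hm
      linear_combination hm
  rw [PySem.Int.floordiv_eq_ediv_of_pos (by norm_num)]
  rw [← key (b - a).toNat b h rfl]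
  exact Int.mul_ediv_cancel_left _ (by norm_num)

theorem pv_reindex (l r : Int) :
    ∑ j ∈ Finset.Ico 1 (Int.sqrt r + 1), (if l ≤ j * j then j * j else 0) =
      ∑ i ∈ Finset.Ico l (r + 1),
        (if 1 ≤ i ∧ Nat.sqrt i.toNat * Nat.sqrt i.toNat = i.toNat then i else 0) := by
  rw [← Finset.sum_filter, ← Finset.sum_filter]
  apply Finset.sum_bij (i := fun k _ => k * k)
  · intro k hk
    rw [Finset.mem_filter, Finset.mem_Ico] at hk
    obtain ⟨⟨hk1, hks⟩, hl⟩ := hk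
    rw [Finset.mem_filter, Finset.mem_Ico]
    have hkr : k * k ≤ r := (pv_sqrt_iff r k hk1).mpr (by omega)
    refine ⟨⟨hl, by omega⟩, by nlinarith, ?_⟩
    have : (k * k).toNat = k.toNat * k.toNat := by
      have h0 : (0:ℤ) ≤ k := by omega
      have h1 : ((k.toNat * k.toNat : ℕ) : ℤ) = k * k := by
        rw [Nat.cast_mul, Int.toNat_of_nonneg h0]
      omega
    rw [this, Nat.sqrt_eq]
  · intro k1 h1 k2 h2 heq
    rw [Finset.mem_filter, Finset.mem_Ico] at h1 h2
    nlinarith [h1.1.1, h2.1.1]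
  · intro i hi
    rw [Finset.mem_filter, Finset.mem_Ico] at hi
    obtain ⟨⟨hil, hir⟩, hi1, hisq⟩ := hi
    have hsq' : ((Nat.sqrt i.toNat : ℤ)) * ((Nat.sqrt i.toNat : ℤ)) = i := by
      have h := congrArg (fun n : ℕ => (n : ℤ)) hisq
      push_cast at h
      omega
    have hs0 : 0 < Nat.sqrt i.toNat := by nlinarith
    refine ⟨(Nat.sqrt i.toNat : ℤ), ?_, ?_⟩
    · rw [Finset.mem_filter, Finset.mem_Ico]
      have hsr : (Nat.sqrt i.toNat : ℤ) ≤ Int.sqrt r :=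
        (pv_sqrt_iff r _ (by exact_mod_cast hs0)).mp (by omega)
      refine ⟨⟨by exact_mod_cast hs0, by omega⟩, by omega⟩
    · omega
  · intro k hk
    rfl

-- ===== VERDICT (by name: the statement is the Claim_ definition above) =====
theorem solution_spec : Claim_equal_solution := by
  intro left right _
  unfold Spec_solution solution_alt
  rw [pv_solution_sum]
  by_cases hlr : right < left
  · rw [if_pos hlr]
    rw [Finset.Ico_eq_empty (by simp; omega), Finset.sum_empty]
  · rw [if_neg hlr]
    rw [pv_loop_eq left right (Int.sqrt right + 1 - 1).toNat 1 _ (by norm_num) rfl]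
    rw [pv_closed_form left right (by omega), pv_reindex]
    have : ∀ i : Int, pvG i = i - 2 * (if 1 ≤ i ∧ Nat.sqrt i.toNat * Nat.sqrt i.toNat = i.toNat then i else 0) := by
      intro i; unfold pvG; split_ifs with h
      · ring
      · ring
    simp only [this]
    rw [Finset.sum_sub_distrib, ← Finset.mul_sum]
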